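-- pv_equiv track=rewrite | github.com/CantaTronic/KCDC_md_DataCite_4_4 | KCDC_MD/fill_md.py | _get_remark
-- ===== SOURCE A (Python) =====
-- def _iter_text(txt: str):
--     for ln in txt.split('\n'):
--         yield ln.strip()
--
-- def _get_remark(txt):
--     started = False
--     for ln in _iter_text(txt):
--         if ln == 'remark':
--             started = True
--         if not started:
--             continue
--         if ln != '':
--             yield ln
-- ===== SOURCE B (Python) =====
-- def _get_remark(txt):
--     lines = [l.strip() for l in txt.split('\n')]
--     try:
--         idx = lines.index('remark')
--     except ValueError:
--         return
--     for l in lines[idx:]: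
--         if l != '':
--             yield l
-- ===== Notes on version B (the rewrite author's own statement) =====
-- stated objective: simpler
-- what changed: B strips all lines up front, locates the marker line once with list.index (ValueError means yield nothing), and filters the tail slice for nonempty lines, instead of A's single pass threading a boolean flag through every line.
import Mathlib
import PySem

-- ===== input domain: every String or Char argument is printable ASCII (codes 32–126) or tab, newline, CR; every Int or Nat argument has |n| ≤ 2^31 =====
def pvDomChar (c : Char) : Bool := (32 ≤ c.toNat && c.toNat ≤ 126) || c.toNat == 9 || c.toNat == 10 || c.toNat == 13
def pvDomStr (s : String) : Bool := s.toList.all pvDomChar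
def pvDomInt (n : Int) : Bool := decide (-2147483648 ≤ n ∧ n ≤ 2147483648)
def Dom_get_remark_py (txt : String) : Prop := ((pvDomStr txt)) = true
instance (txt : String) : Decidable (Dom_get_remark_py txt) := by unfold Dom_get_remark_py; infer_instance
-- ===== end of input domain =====

-- B finds the 'remark' marker once with list.index and filters the tail slice, instead of A's flag-threading pass: simpler decomposition, same O(n) cost.


-- ===== PORT A =====
-- _iter_text inlined as the stripped-lines list; the generator loop becomes a foldl over (started, yielded-so-far)
def get_remark_py (txt : String) : List String :=
  (((((PySem.Str.split? txt "\n").getD [txt]).map PySem.Str.strip).foldl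
      (fun (st : Bool × List String) ln =>
        let started := if ln = "remark" then true else st.1
        if !started then (started, st.2)
        else if ln ≠ "" then (started, st.2 ++ [ln])
        else (started, st.2))
      (false, []))).2

-- ===== PORT B =====
def get_remark_py_alt (txt : String) : List String :=
  let lines := ((PySem.Str.split? txt "\n").getD [txt]).map PySem.Str.strip
  match PySem.List.index? lines "remark" with
  | none => []
  | some i => (PySem.List.slice lines (some (i : Int)) none).filter (fun l => l ≠ "")

-- ===== PRECONDITION & SPEC =====
def Spec_get_remark_py (txt : String) (out : List String) : Prop := out = get_remark_py_alt txt
instance (txt : String) (out : List String) : Decidable (Spec_get_remark_py txt out) := by unfold Spec_get_remark_py; infer_instance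

-- ===== CLAIM (what is proved, stated in full; the proofs are below) =====
def Claim_equal_get_remark_py : Prop := ∀ (txt : String), Dom_get_remark_py txt → Spec_get_remark_py txt (get_remark_py txt)

-- ===== LEMMAS AND PROOFS =====

-- abbreviation for A's loop body (proof-local)
def pvStep (st : Bool × List String) (ln : String) : Bool × List String :=
  let started := if ln = "remark" then true else st.1
  if !started then (started, st.2)
  else if ln ≠ "" then (started, st.2 ++ [ln])
  else (started, st.2)

lemma pvStep_started : ∀ (ls : List String) (acc : List String),
    (ls.foldl pvStep (true, acc)).2 = acc ++ ls.filter (fun l => l ≠ "") := by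
  intro ls
  induction ls with
  | nil => simp
  | cons x xs ih =>
    intro acc
    simp only [List.foldl_cons, List.filter_cons]
    by_cases hx : x = ""
    · subst hx
      simp [pvStep, ih]
    · simp only [pvStep]
      have : (if x = "remark" then true else true) = true := by split <;> rfl
      simp [hx, ih, List.append_assoc]

lemma pvMain : ∀ (ls : List String) (acc : List String),
    (ls.foldl pvStep (false, acc)).2
      = acc ++ (match PySem.List.index? ls "remark" with
                | none => []
                | some i => (ls.drop i).filter (fun l => l ≠ "")) := by
  intro ls
  induction ls with
  | nil => simp [PySem.List.index?]
  | cons x xs ih =>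
    intro acc
    by_cases hx : x = "remark"
    · subst hx
      rw [PySem.List.index?_cons_self]
      simp only [List.foldl_cons, pvStep]
      simp [pvStep_started]
    · rw [PySem.List.index?_cons_of_ne _ hx]
      have hstep : pvStep (false, acc) x = (false, acc) := by
        simp [pvStep, hx]
      rw [List.foldl_cons, hstep, ih]
      cases h : PySem.List.index? xs "remark" with
      | none => simp
      | some i => simp

theorem pv_eq (txt : String) : get_remark_py txt = get_remark_py_alt txt := by
  unfold get_remark_py get_remark_py_alt
  have hfold : (fun (st : Bool × List String) ln =>
        let started := if ln = "remark" then true else st.1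
        if !started then (started, st.2)
        else if ln ≠ "" then (started, st.2 ++ [ln])
        else (started, st.2)) = pvStep := rfl
  rw [hfold, pvMain, List.nil_append]
  cases h : PySem.List.index? (((PySem.Str.split? txt "\n").getD [txt]).map PySem.Str.strip) "remark" with
  | none =>
    rw [PySem.List.index?_eq_idxOf?] at h
    simp [h]
  | some i =>
    rw [PySem.List.index?_eq_idxOf?] at h
    simp [h, PySem.List.slice_from_natCast]

-- ===== VERDICT (by name: the statement is the Claim_ definition above) =====
theorem get_remark_py_spec : Claim_equal_get_remark_py := by
  intro txt _
  unfold Spec_get_remark_py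
  exact pv_eq txt
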